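-- pv_equiv track=rewrite | github.com/lagoueduCol/Algorithm-Dryad | 21.Meets/903.py | get_modified_array
-- ===== SOURCE A (Python) =====
-- def get_modified_array(length, updates):
--     # Write your code here
--     A = [0] * length;
--     for x in updates:
--         startIndex = x[0]
--         endIndex = x[1]
--         value = x[2]
--
--         if startIndex > endIndex:
--             continue
--         if startIndex >= length:
--             continue
--         if endIndex < 0:
--             continue
--
--         if startIndex < 0:
--             startIndex = 0
--         A[startIndex] += value
--
--         if endIndex + 1 < length:
--             A[endIndex + 1] -= value
--
--     pre = 0
--     for i in range(0, length):
--         pre += A[i]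
--         A[i] = pre
--
--     return A
-- ===== SOURCE B (Python) =====
-- def get_modified_array(length, updates):
--     # Naive direct version: apply each range increment element by element,
--     # no difference array and no prefix-sum pass.
--     A = [0] * length
--     for x in updates:
--         start, end, value = x[0], x[1], x[2]
--         if start > end or start >= length or end < 0:
--             continue
--         for i in range(max(0, start), min(end, length - 1) + 1):
--             A[i] += value
--     return A
-- ===== Notes on version B (the rewrite author's own statement) =====
-- stated objective: simpler
-- what changed: Replaces the difference-array-plus-prefix-sum strategy with direct per-element range increments applied straight to the output array, dropping the second pass entirely.
import Mathlib
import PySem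

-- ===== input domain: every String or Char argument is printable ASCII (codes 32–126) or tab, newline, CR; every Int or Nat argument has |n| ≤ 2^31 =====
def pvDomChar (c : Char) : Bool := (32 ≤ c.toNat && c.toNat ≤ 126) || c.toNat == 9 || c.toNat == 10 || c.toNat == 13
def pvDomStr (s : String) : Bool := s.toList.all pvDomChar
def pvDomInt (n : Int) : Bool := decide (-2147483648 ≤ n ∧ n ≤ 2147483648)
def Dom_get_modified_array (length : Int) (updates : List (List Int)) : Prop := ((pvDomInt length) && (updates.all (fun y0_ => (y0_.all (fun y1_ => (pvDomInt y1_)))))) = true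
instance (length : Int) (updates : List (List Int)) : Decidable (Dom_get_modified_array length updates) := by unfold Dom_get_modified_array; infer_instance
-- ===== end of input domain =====

-- B replaces A's difference-array + prefix-sum strategy with direct per-element range
-- increments on the output array (simpler, one pass over the output is dropped).

-- ===== PORT A =====
-- one update step of A's first loop: the two point-updates of the difference array
-- (x[0], x[1], x[2] read with pyGet?; the .getD 0 default is only reached outside Pre_,
-- where Python raises IndexError)
def pvStepA (length : Int) (A : List Int) (x : List Int) : List Int :=
  let startIndex := (PySem.List.pyGet? x 0).getD 0
  let endIndex := (PySem.List.pyGet? x 1).getD 0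
  let value := (PySem.List.pyGet? x 2).getD 0
  if startIndex > endIndex then A
  else if startIndex ≥ length then A
  else if endIndex < 0 then A
  else
    let startIndex := if startIndex < 0 then 0 else startIndex
    let A := A.modify startIndex.toNat (fun a => a + value)
    if endIndex + 1 < length then A.modify (endIndex + 1).toNat (fun a => a - value) else A

-- the prefix-sum pass 'for i in range(0, length)' as the obvious structural recursion
-- over A (the loop visits exactly the indices of A, since len(A) = length)
def pvPrefix (pre : Int) : List Int → List Int
  | [] => []
  | a :: rest => (pre + a) :: pvPrefix (pre + a) rest

def get_modified_array (length : Int) (updates : List (List Int)) : List Int :=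
  let A := List.replicate length.toNat 0
  let A := updates.foldl (pvStepA length) A
  pvPrefix 0 A

-- ===== PORT B =====
-- one update step of B: add value directly at every index of the clamped range
def pvStepB (length : Int) (A : List Int) (x : List Int) : List Int :=
  let start := (PySem.List.pyGet? x 0).getD 0
  let «end» := (PySem.List.pyGet? x 1).getD 0
  let value := (PySem.List.pyGet? x 2).getD 0
  if start > «end» ∨ start ≥ length ∨ «end» < 0 then A
  else (PySem.List.pyRange (max 0 start) (min «end» (length - 1) + 1) 1).foldl
        (fun A i => A.modify i.toNat (fun a => a + value)) A

def get_modified_array_alt (length : Int) (updates : List (List Int)) : List Int :=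
  let A := List.replicate length.toNat 0
  updates.foldl (pvStepB length) A

-- ===== PRECONDITION & SPEC =====
-- Pre_ excludes exactly the inputs where Python A raises IndexError: an update with fewer
-- than 3 entries, or length ≤ 0 (empty array) together with an update that passes all three
-- guards (that update then writes A[0] of an empty list).
def Pre_get_modified_array (length : Int) (updates : List (List Int)) : Prop :=
  (∀ x ∈ updates, 3 ≤ x.length) ∧
  (length ≤ 0 → ∀ x ∈ updates, x.getD 0 0 > x.getD 1 0 ∨ x.getD 0 0 ≥ length ∨ x.getD 1 0 < 0)
instance (length : Int) (updates : List (List Int)) : Decidable (Pre_get_modified_array length updates) := by unfold Pre_get_modified_array; infer_instance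

def pvWitness_get_modified_array : Int × List (List Int) := (5, [[1, 3, 2], [-2, 10, 7], [4, 1, 9]])

def Spec_get_modified_array (length : Int) (updates : List (List Int)) (out : List Int) : Prop := out = get_modified_array_alt length updates
instance (length : Int) (updates : List (List Int)) (out : List Int) : Decidable (Spec_get_modified_array length updates out) := by unfold Spec_get_modified_array; infer_instance

-- ===== CLAIM (what is proved, stated in full; the proofs are below) =====
def Claim_equal_get_modified_array : Prop := ∀ (length : Int) (updates : List (List Int)), Dom_get_modified_array length updates → Pre_get_modified_array length updates → Spec_get_modified_array length updates (get_modified_array length updates)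

-- ===== LEMMAS AND PROOFS =====

-- addFrom v j D : add v to every element of D at index ≥ j (proof-only helper)
def addFrom (v : Int) : Nat → List Int → List Int
  | _, [] => []
  | 0, a :: r => (a + v) :: addFrom v 0 r
  | j + 1, a :: r => a :: addFrom v j r

theorem length_pvPrefix (p : Int) (D : List Int) : (pvPrefix p D).length = D.length := by
  induction D generalizing p with
  | nil => rfl
  | cons a r ih => simp [pvPrefix, ih]

theorem pvPrefix_shift (v p : Int) (D : List Int) :
    pvPrefix (p + v) D = addFrom v 0 (pvPrefix p D) := by
  induction D generalizing p with
  | nil => rfl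
  | cons a r ih =>
    simp only [pvPrefix, addFrom, List.cons.injEq]
    refine ⟨by ring, ?_⟩
    rw [show p + v + a = p + a + v by ring, ih (p + a)]

theorem pvPrefix_modify (v p : Int) (j : Nat) (D : List Int) :
    pvPrefix p (D.modify j (fun a => a + v)) = addFrom v j (pvPrefix p D) := by
  induction D generalizing p j with
  | nil => simp [List.modify_nil, pvPrefix, addFrom]
  | cons a r ih =>
    cases j with
    | zero =>
      rw [List.modify_zero_cons]
      simp only [pvPrefix, addFrom, List.cons.injEq]
      refine ⟨by ring, ?_⟩
      rw [show p + (a + v) = (p + a) + v by ring, pvPrefix_shift]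
    | succ j =>
      rw [List.modify_succ_cons]
      simp only [pvPrefix, addFrom, List.cons.injEq, true_and]
      exact ih (p + a) j

theorem addFrom_of_le (v : Int) (j : Nat) (D : List Int) (h : D.length ≤ j) :
    addFrom v j D = D := by
  induction D generalizing j with
  | nil => rfl
  | cons a r ih =>
    cases j with
    | zero => simp at h
    | succ j => simp only [addFrom]; simp at h; rw [ih j h]

theorem addFrom_addFrom_same (v w : Int) (j : Nat) (D : List Int) :
    addFrom v j (addFrom w j D) = addFrom (v + w) j D := by
  induction D generalizing j with
  | nil => rfl
  | cons a r ih =>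
    cases j with
    | zero => simp only [addFrom]; rw [ih 0]; ring_nf
    | succ j => simp only [addFrom]; rw [ih j]

theorem addFrom_zero_val (j : Nat) (D : List Int) : addFrom 0 j D = D := by
  induction D generalizing j with
  | nil => rfl
  | cons a r ih =>
    cases j with
    | zero => simp only [addFrom]; rw [ih 0]; simp
    | succ j => simp only [addFrom]; rw [ih j]

theorem addFrom_comm (v w : Int) (j k : Nat) (D : List Int) :
    addFrom v j (addFrom w k D) = addFrom w k (addFrom v j D) := by
  induction D generalizing j k with
  | nil => rfl
  | cons a r ih =>
    cases j with
    | zero =>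
      cases k with
      | zero => simp only [addFrom]; rw [ih 0 0]; ring_nf
      | succ k => simp only [addFrom]; rw [ih 0 k]
    | succ j =>
      cases k with
      | zero => simp only [addFrom]; rw [ih j 0]
      | succ k => simp only [addFrom]; rw [ih j k]

theorem addFrom_succ_modify (v : Int) (j : Nat) (D : List Int) :
    addFrom v j D = addFrom v (j + 1) (D.modify j (fun a => a + v)) := by
  induction D generalizing j with
  | nil => simp [addFrom, List.modify_nil]
  | cons a r ih =>
    cases j with
    | zero =>
      rw [List.modify_zero_cons]
      simp only [addFrom]
    | succ j =>
      rw [List.modify_succ_cons]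
      simp only [addFrom, List.cons.injEq, true_and]
      exact ih j

theorem addFrom_modify_comm (w v : Int) (k j : Nat) (D : List Int) :
    addFrom w k (D.modify j (fun a => a + v)) = (addFrom w k D).modify j (fun a => a + v) := by
  induction D generalizing k j with
  | nil => simp [addFrom, List.modify_nil]
  | cons a r ih =>
    cases k with
    | zero =>
      cases j with
      | zero =>
        rw [List.modify_zero_cons]
        simp only [addFrom]
        rw [List.modify_zero_cons]
        simp only [List.cons.injEq, and_true]
        ring
      | succ j =>
        rw [List.modify_succ_cons]
        simp only [addFrom]
        rw [List.modify_succ_cons]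
        simp only [List.cons.injEq, true_and]
        exact ih 0 j
    | succ k =>
      cases j with
      | zero =>
        rw [List.modify_zero_cons]
        simp only [addFrom]
        rw [List.modify_zero_cons]
      | succ j =>
        rw [List.modify_succ_cons]
        simp only [addFrom]
        rw [List.modify_succ_cons]
        simp only [List.cons.injEq, true_and]
        exact ih k j

theorem rangeFold_eq (n : Nat) (v lo hi : Int) (P : List Int) (h0 : 0 ≤ lo) (hle : lo ≤ hi)
    (hn : (hi - lo).toNat = n) :
    (PySem.List.pyRange lo hi 1).foldl (fun A i => A.modify i.toNat (fun a => a + v)) P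
      = addFrom v lo.toNat (addFrom (-v) hi.toNat P) := by
  induction n generalizing lo P with
  | zero =>
    have heq : hi = lo := by omega
    subst heq
    rw [PySem.List.pyRange_one_eq_nil (le_refl hi)]
    simp only [List.foldl_nil]
    rw [addFrom_addFrom_same, show v + -v = 0 by ring, addFrom_zero_val]
  | succ n ih =>
    have hlt : lo < hi := by omega
    rw [PySem.List.pyRange_one_cons hlt]
    simp only [List.foldl_cons]
    rw [ih (lo + 1) (P.modify lo.toNat (fun a => a + v)) (by omega) (by omega) (by omega)]
    rw [addFrom_modify_comm, show (lo + 1).toNat = lo.toNat + 1 by omega, ← addFrom_succ_modify]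

theorem foldl_modify_nil (v : Int) (l : List Int) :
    l.foldl (fun A i => A.modify i.toNat (fun a => a + v)) ([] : List Int) = [] := by
  induction l with
  | nil => rfl
  | cons i l ih => simp only [List.foldl_cons, List.modify_nil]; exact ih

theorem length_pvStepA (length : Int) (D x : List Int) : (pvStepA length D x).length = D.length := by
  simp only [pvStepA]
  split_ifs <;> simp [List.length_modify]

theorem pvStepA_nil (length : Int) (x : List Int) : pvStepA length [] x = [] := by
  simp only [pvStepA]
  split_ifs <;> simp [List.modify_nil]

theorem pvStepB_nil (length : Int) (x : List Int) : pvStepB length [] x = [] := by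
  simp only [pvStepB]
  split_ifs with h
  · rfl
  · exact foldl_modify_nil _ _

theorem step_eq (length : Int) (x D : List Int) (hlen : D.length = length.toNat) :
    pvPrefix 0 (pvStepA length D x) = pvStepB length (pvPrefix 0 D) x := by
  rcases D with _ | ⟨d, D'⟩
  · rw [pvStepA_nil]
    show pvPrefix 0 [] = pvStepB length (pvPrefix 0 []) x
    show ([] : List Int) = pvStepB length [] x
    rw [pvStepB_nil]
  · have hpos : 0 < length := by
      have : 0 < (d :: D').length := by simp
      omega
    set s := (PySem.List.pyGet? x 0).getD 0 with hs
    set e := (PySem.List.pyGet? x 1).getD 0 with he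
    set v := (PySem.List.pyGet? x 2).getD 0 with hv
    set P := pvPrefix 0 (d :: D') with hP
    have hPlen : P.length = length.toNat := by rw [hP, length_pvPrefix]; exact hlen
    by_cases h1 : s > e
    · rw [show pvStepA length (d :: D') x = d :: D' from by simp only [pvStepA]; rw [← hs, ← he, ← hv]; rw [if_pos h1],
        show pvStepB length P x = P from by simp only [pvStepB]; rw [← hs, ← he, ← hv]; rw [if_pos (Or.inl h1)]]
    by_cases h2 : s ≥ length
    · rw [show pvStepA length (d :: D') x = d :: D' from by simp only [pvStepA]; rw [← hs, ← he, ← hv]; rw [if_neg h1, if_pos h2],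
        show pvStepB length P x = P from by simp only [pvStepB]; rw [← hs, ← he, ← hv]; rw [if_pos (Or.inr (Or.inl h2))]]
    by_cases h3 : e < 0
    · rw [show pvStepA length (d :: D') x = d :: D' from by simp only [pvStepA]; rw [← hs, ← he, ← hv]; rw [if_neg h1, if_neg h2, if_pos h3],
        show pvStepB length P x = P from by simp only [pvStepB]; rw [← hs, ← he, ← hv]; rw [if_pos (Or.inr (Or.inr h3))]]
    -- live update: s ≤ e, s < length, 0 ≤ e
    have hsub : (fun a : Int => a - v) = (fun a : Int => a + (-v)) := by funext a; ring
    have hA : pvStepA length (d :: D') x =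
        (if e + 1 < length then
          ((d :: D').modify (if s < 0 then 0 else s).toNat (fun a => a + v)).modify (e + 1).toNat (fun a => a + (-v))
        else (d :: D').modify (if s < 0 then 0 else s).toNat (fun a => a + v)) := by
      simp only [pvStepA]
      rw [← hs, ← he, ← hv, if_neg h1, if_neg h2, if_neg h3, hsub]
    have hB : pvStepB length P x =
        (PySem.List.pyRange (max 0 s) (min e (length - 1) + 1) 1).foldl
          (fun A i => A.modify i.toNat (fun a => a + v)) P := by
      simp only [pvStepB]
      rw [← hs, ← he, ← hv]
      rw [if_neg (by push Not; exact ⟨le_of_not_gt h1, lt_of_not_ge h2, le_of_not_gt h3⟩)]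
    have hmax : (if s < 0 then (0 : Int) else s) = max 0 s := by split <;> omega
    rw [hA, hB,
      rangeFold_eq ((min e (length - 1) + 1 - max 0 s).toNat) v (max 0 s) (min e (length - 1) + 1) P
        (by omega) (by omega) rfl]
    by_cases h4 : e + 1 < length
    · rw [if_pos h4, pvPrefix_modify, pvPrefix_modify, ← hP, hmax,
        show min e (length - 1) + 1 = e + 1 by omega, addFrom_comm]
    · rw [if_neg h4, pvPrefix_modify, ← hP, hmax,
        show (min e (length - 1) + 1).toNat = length.toNat by omega,
        addFrom_of_le (-v) length.toNat P (le_of_eq hPlen)]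

theorem sim (length : Int) (us : List (List Int)) (D : List Int) (hlen : D.length = length.toNat) :
    pvPrefix 0 (us.foldl (pvStepA length) D) = us.foldl (pvStepB length) (pvPrefix 0 D) := by
  induction us generalizing D with
  | nil => rfl
  | cons x us ih =>
    simp only [List.foldl_cons]
    rw [ih (pvStepA length D x) (by rw [length_pvStepA]; exact hlen), step_eq length x D hlen]

theorem pvPrefix_replicate_zero (n : Nat) :
    pvPrefix 0 (List.replicate n (0 : Int)) = List.replicate n 0 := by
  induction n with
  | zero => rfl
  | succ n ih => simp only [List.replicate_succ, pvPrefix, add_zero]; rw [ih]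

theorem get_modified_array_spec : Claim_equal_get_modified_array := by
  intro length updates _ _
  show get_modified_array length updates = get_modified_array_alt length updates
  unfold get_modified_array get_modified_array_alt
  rw [sim length updates (List.replicate length.toNat 0) (by simp), pvPrefix_replicate_zero]
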